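-- pv_equiv track=rewrite | github.com/jayusctrojan/Empire | app/services/cypher_generation_service.py | _is_safe_query
-- ===== SOURCE A (Python) =====
-- def _is_safe_query(cypher: str) -> bool:
--     """
--     Validate that a Cypher query is safe (read-only).
--
--     Args:
--         cypher: Cypher query string.
--
--     Returns:
--         True if the query is safe to execute.
--     """
--     # Normalize for checking
--     upper_cypher = cypher.upper()
--
--     # Forbidden keywords for write operations
--     forbidden = [
--         "CREATE", "MERGE", "SET", "DELETE", "REMOVE",
--         "DETACH", "DROP", "CALL", "FOREACH"
--     ]
--
--     for keyword in forbidden: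
--         # Check for keyword as a word (not part of another word)
--         if f" {keyword} " in f" {upper_cypher} " or upper_cypher.startswith(f"{keyword} "):
--             return False
--
--     return True
-- ===== SOURCE B (Python) =====
-- def _is_safe_query(cypher: str) -> bool:
--     forbidden = "CREATE MERGE SET DELETE REMOVE DETACH DROP CALL FOREACH".split(' ')
--     return set(cypher.upper().split(' ')).isdisjoint(forbidden)
-- ===== Notes on version B (the rewrite author's own statement) =====
-- stated objective: idiomatic
-- what changed: Replaces A's nine per-keyword padded-substring scans plus a startswith check by splitting the uppercased query on single spaces once into a set of tokens and testing that set for disjointness with the forbidden-keyword list.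
import Mathlib
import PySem

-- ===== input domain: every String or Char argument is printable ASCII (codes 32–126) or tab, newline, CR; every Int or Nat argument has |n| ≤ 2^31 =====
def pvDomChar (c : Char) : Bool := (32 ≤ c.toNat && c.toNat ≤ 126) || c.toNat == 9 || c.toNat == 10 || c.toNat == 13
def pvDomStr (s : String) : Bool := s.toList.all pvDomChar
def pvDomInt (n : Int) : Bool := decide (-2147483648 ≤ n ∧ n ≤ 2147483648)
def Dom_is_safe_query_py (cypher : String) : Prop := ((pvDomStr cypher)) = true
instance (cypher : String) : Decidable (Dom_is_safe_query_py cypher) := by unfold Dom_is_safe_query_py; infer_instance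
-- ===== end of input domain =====

-- ===== PORT A =====
-- B tokenizes once (split on single spaces) and checks set disjointness with the forbidden keywords;
-- A's per-keyword padded-substring scans are proved equivalent.
-- A-side helper: the forbidden keyword list (as lists of chars).
def isqForbiddenA : List (List Char) :=
  ["CREATE".toList, "MERGE".toList, "SET".toList, "DELETE".toList, "REMOVE".toList,
   "DETACH".toList, "DROP".toList, "CALL".toList, "FOREACH".toList]

-- A-side helper: the 'for keyword in forbidden' loop with its early 'return False'.
def isqLoopA (up : List Char) : List (List Char) → Bool
  | [] => true
  | kw :: rest =>
    if PySem.Chars.isIn (' ' :: (kw ++ [' '])) (' ' :: (up ++ [' ']))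
        || PySem.Chars.startswith up (kw ++ [' ']) then false
    else isqLoopA up rest

def is_safe_query_py (cypher : String) : Bool :=
  isqLoopA (PySem.Chars.upper cypher.toList) isqForbiddenA

-- ===== PORT B =====
-- B-side helper: forbidden = "…".split(' ').
def isqForbiddenB : List (List Char) :=
  PySem.Chars.splitOn "CREATE MERGE SET DELETE REMOVE DETACH DROP CALL FOREACH".toList [' ']

def is_safe_query_py_alt (cypher : String) : Bool :=
  PySem.Set.isdisjoint
    (PySem.Set.ofList (PySem.Chars.splitOn (PySem.Chars.upper cypher.toList) [' ']))
    isqForbiddenB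

-- ===== PRECONDITION & SPEC =====
def Spec_is_safe_query_py (cypher : String) (out : Bool) : Prop := out = is_safe_query_py_alt cypher
instance (cypher : String) (out : Bool) : Decidable (Spec_is_safe_query_py cypher out) := by unfold Spec_is_safe_query_py; infer_instance

-- ===== CLAIM (what is proved, stated in full; the proofs are below) =====
def Claim_equal_is_safe_query_py : Prop := ∀ (cypher : String), Dom_is_safe_query_py cypher → Spec_is_safe_query_py cypher (is_safe_query_py cypher)

-- ===== LEMMAS AND PROOFS =====

-- Proof-side reference tokenizer: split a char list on single spaces (always nonempty).
def splitSp : List Char → List (List Char)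
  | [] => [[]]
  | c :: rest =>
    if c = ' ' then [] :: splitSp rest
    else match splitSp rest with
      | [] => [[c]]
      | t :: ts => (c :: t) :: ts

theorem splitSp_ne_nil (s : List Char) : splitSp s ≠ [] := by
  cases s with
  | nil => simp [splitSp]
  | cons c rest =>
    simp only [splitSp]
    split
    · simp
    · cases h : splitSp rest <;> simp

-- PySem's split(' ') agrees with the reference tokenizer (fuel-general loop invariant).
theorem splitOn_go_space : ∀ (fuel : Nat) (l cur : List Char) (acc : List (List Char)),
    l.length ≤ fuel →
    PySem.Chars.splitOn.go [' '] fuel l cur acc =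
      acc.reverse ++ (cur.reverse ++ (splitSp l).headI) :: (splitSp l).tail := by
  intro fuel
  induction fuel with
  | zero =>
    intro l cur acc hl
    have : l = [] := List.length_eq_zero_iff.mp (Nat.le_zero.mp hl)
    subst this
    simp [PySem.Chars.splitOn.go, splitSp]
  | succ fuel ih =>
    intro l cur acc hl
    cases l with
    | nil => simp [PySem.Chars.splitOn.go, splitSp]
    | cons c rest =>
      obtain ⟨h, t, hrest⟩ := List.exists_cons_of_ne_nil (splitSp_ne_nil rest)
      by_cases hc : c = ' '
      · rw [PySem.Chars.splitOn.go]
        have hpre : ([' '] : List Char).isPrefixOf (c :: rest) = true := by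
          simp [List.isPrefixOf, hc]
        rw [if_pos hpre]
        simp only [List.length_cons] at hl
        have := ih rest [] (cur.reverse :: acc) (Nat.le_of_succ_le_succ hl)
        simp only [List.length_cons, List.length_nil, Nat.zero_add, List.drop_succ_cons,
          List.drop_zero]
        rw [this]
        simp [splitSp, hc, hrest]
      · rw [PySem.Chars.splitOn.go]
        have hpre : ([' '] : List Char).isPrefixOf (c :: rest) = false := by
          simp [List.isPrefixOf]
          intro h'; exact absurd h'.symm hc
        rw [if_neg (by simp [hpre])]
        simp only [List.length_cons] at hl
        have := ih rest (c :: cur) acc (Nat.le_of_succ_le_succ hl)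
        rw [this]
        simp [splitSp, hc, hrest]

theorem splitOn_space (s : List Char) : PySem.Chars.splitOn s [' '] = splitSp s := by
  have := splitOn_go_space (s.length + 1) s [] [] (Nat.le_succ _)
  rw [PySem.Chars.splitOn, this]
  obtain ⟨h, t, hrest⟩ := List.exists_cons_of_ne_nil (splitSp_ne_nil s)
  simp [hrest]

-- first token of s, as a prefix fact
theorem prefix_iff_headI :
    ∀ (s kw : List Char), ' ' ∉ kw → ((kw ++ [' ']) <+: (s ++ [' ']) ↔ (splitSp s).headI = kw) := by
  intro s
  induction s with
  | nil =>
    intro kw _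
    cases kw with
    | nil => simp [splitSp]
    | cons k kt =>
      simp only [List.cons_append, List.nil_append, splitSp, List.headI]
      constructor
      · intro hp
        rcases List.cons_prefix_cons.mp hp with ⟨-, hp2⟩
        simp [List.prefix_nil] at hp2
      · intro he
        exact absurd he (by simp)
  | cons c rest ih =>
    intro kw hsp
    obtain ⟨h, t, hrest⟩ := List.exists_cons_of_ne_nil (splitSp_ne_nil rest)
    cases kw with
    | nil =>
      by_cases hc : c = ' '
      · simp [splitSp, hc, List.cons_prefix_cons]
      · simp [splitSp, hc, hrest, List.cons_prefix_cons, eq_comm]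
    | cons k kt =>
      have hk : k ≠ ' ' := fun he => hsp (by simp [he])
      have hkt : ' ' ∉ kt := fun he => hsp (by simp [he])
      by_cases hc : c = ' '
      · simp [splitSp, hc, List.cons_prefix_cons, hk, eq_comm]
      · have := ih kt hkt
        rw [hrest] at this
        simp only [List.headI] at this
        simp only [List.cons_append, splitSp, if_neg hc, hrest, List.headI,
          List.cons_prefix_cons, this]
        constructor
        · rintro ⟨rfl, rfl⟩
          rfl
        · intro he
          injection he with h1 h2
          exact ⟨h1.symm, h2⟩

-- occurrences of " kw " inside s ++ " " are exactly the non-first tokens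
theorem infix_tail_iff (kw : List Char) (hsp : ' ' ∉ kw) :
    ∀ s : List Char, ((' ' :: (kw ++ [' '])) <:+: (s ++ [' '])) ↔ kw ∈ (splitSp s).tail := by
  intro s
  induction s with
  | nil =>
    simp only [List.nil_append, splitSp, List.tail_cons, List.not_mem_nil, iff_false]
    intro hinf
    have := hinf.length_le
    simp at this
  | cons c rest ih =>
    rw [List.cons_append, List.infix_cons_iff]
    obtain ⟨h, t, hrest⟩ := List.exists_cons_of_ne_nil (splitSp_ne_nil rest)
    by_cases hc : c = ' '
    · have hpre := prefix_iff_headI rest kw hsp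
      rw [hrest] at hpre
      simp only [List.headI] at hpre
      simp [splitSp, hc, List.cons_prefix_cons, hpre, ih, hrest, eq_comm]
    · simp [splitSp, hc, hrest, List.cons_prefix_cons, ih]
      intro he
      exact absurd he.symm hc

-- occurrences of " kw " inside " " ++ s ++ " " are exactly the tokens of s
theorem infix_iff_mem (kw : List Char) (hsp : ' ' ∉ kw) (s : List Char) :
    ((' ' :: (kw ++ [' '])) <:+: (' ' :: (s ++ [' ']))) ↔ kw ∈ splitSp s := by
  rw [List.infix_cons_iff, List.cons_prefix_cons]
  obtain ⟨h, t, hrest⟩ := List.exists_cons_of_ne_nil (splitSp_ne_nil s)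
  have hpre := prefix_iff_headI s kw hsp
  rw [hrest] at hpre
  simp only [List.headI] at hpre
  simp [hpre, infix_tail_iff kw hsp s, hrest, eq_comm]

-- A's loop is a Boolean 'any' over the keyword list
theorem isqLoopA_eq (up : List Char) (l : List (List Char)) :
    isqLoopA up l = !(l.any (fun kw =>
      PySem.Chars.isIn (' ' :: (kw ++ [' '])) (' ' :: (up ++ [' ']))
        || PySem.Chars.startswith up (kw ++ [' ']))) := by
  induction l with
  | nil => simp [isqLoopA]
  | cons kw rest ih =>
    simp only [isqLoopA, List.any_cons]
    cases h : (PySem.Chars.isIn (' ' :: (kw ++ [' '])) (' ' :: (up ++ [' ']))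
        || PySem.Chars.startswith up (kw ++ [' '])) with
    | true => simp
    | false => simp [ih]

theorem forbiddenB_eq : isqForbiddenB = isqForbiddenA := by decide

theorem main_eq (up : List Char) :
    isqLoopA up isqForbiddenA =
      PySem.Set.isdisjoint (PySem.Set.ofList (PySem.Chars.splitOn up [' '])) isqForbiddenB := by
  have hcond : ∀ kw ∈ isqForbiddenA,
      (PySem.Chars.isIn (' ' :: (kw ++ [' '])) (' ' :: (up ++ [' '])) = true
        ∨ PySem.Chars.startswith up (kw ++ [' ']) = true) ↔ kw ∈ splitSp up := by
    intro kw hkw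
    have h1 : ' ' ∉ kw := by fin_cases hkw <;> decide
    rw [PySem.Chars.isIn_iff_infix, PySem.Chars.startswith_iff]
    constructor
    · rintro (h2 | h2)
      · exact (infix_iff_mem kw h1 up).mp h2
      · refine (infix_iff_mem kw h1 up).mp ?_
        exact (List.cons_prefix_cons.mpr ⟨rfl, h2.trans (List.prefix_append up [' '])⟩).isInfix
    · intro h2
      exact Or.inl ((infix_iff_mem kw h1 up).mpr h2)
  rw [isqLoopA_eq, splitOn_space, forbiddenB_eq, Bool.eq_iff_iff, PySem.Set.isdisjoint_iff]
  simp only [Bool.not_eq_true', List.any_eq_false]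
  constructor
  · intro hA x hx hmem
    have hx' : x ∈ splitSp up := (PySem.Set.mem_ofList _ _).mp hx
    have h2 := hA x hmem
    refine h2 ((Bool.or_eq_true _ _).mpr ?_)
    exact (hcond x hmem).mpr hx'
  · intro hB kw hkw hor
    have hnot : kw ∉ splitSp up := fun hm => hB kw ((PySem.Set.mem_ofList _ _).mpr hm) hkw
    exact hnot ((hcond kw hkw).mp ((Bool.or_eq_true _ _).mp hor))

-- ===== VERDICT (by name: the statement is the Claim_ definition above) =====
theorem is_safe_query_py_spec : Claim_equal_is_safe_query_py := by
  intro cypher _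
  unfold Spec_is_safe_query_py is_safe_query_py is_safe_query_py_alt
  exact main_eq _
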